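-- pv_equiv track=rewrite | github.com/kimghw/win32hwp | debugs/match_pure_right.py | find_end_level_index
-- ===== SOURCE A (Python) =====
-- TOLERANCE = 3
--
-- def find_end_level_index(value, levels):
--     for idx, level in enumerate(levels):
--         if abs(value - level) <= TOLERANCE:
--             return max(0, idx - 1)
--     for idx in range(len(levels) - 1, -1, -1):
--         if levels[idx] < value - TOLERANCE:
--             return idx
--     return 0
-- ===== SOURCE B (Python) =====
-- TOLERANCE = 3
--
-- def find_end_level_index(value, levels):
--     last_below = None
--     for idx, level in enumerate(levels):
--         if abs(value - level) <= TOLERANCE: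
--             return max(0, idx - 1)
--         if level < value - TOLERANCE:
--             last_below = idx
--     return last_below if last_below is not None else 0
-- ===== Notes on version B (the rewrite author's own statement) =====
-- stated objective: simpler
-- what changed: Replaces A's two passes (forward tolerance scan then a separate backward index scan) with one forward pass that tracks the last index strictly below value-TOLERANCE, eliminating the second loop and all indexing.
import Mathlib
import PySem

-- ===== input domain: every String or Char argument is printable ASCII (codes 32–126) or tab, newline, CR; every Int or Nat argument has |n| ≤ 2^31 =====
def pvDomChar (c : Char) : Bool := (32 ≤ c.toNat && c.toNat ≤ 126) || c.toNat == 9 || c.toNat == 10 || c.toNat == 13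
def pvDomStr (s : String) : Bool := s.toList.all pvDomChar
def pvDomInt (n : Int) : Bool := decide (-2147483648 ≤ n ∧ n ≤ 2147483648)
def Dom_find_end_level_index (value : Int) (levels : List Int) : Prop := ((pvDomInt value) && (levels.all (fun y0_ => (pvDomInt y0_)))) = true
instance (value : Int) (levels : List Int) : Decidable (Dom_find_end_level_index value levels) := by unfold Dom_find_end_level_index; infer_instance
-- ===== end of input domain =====

-- B replaces A's two passes (forward tolerance scan, then a separate backward scan for an index
-- below value-TOLERANCE) with one forward pass tracking the last below-index; objective: simpler.

-- ===== PORT A =====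
-- first loop: for idx, level in enumerate(levels): if abs(value-level) <= 3: return max(0, idx-1)
def pvFwdA (value : Int) : List Int → Int → Option Int
  | [], _ => none
  | l :: ls, idx => if |value - l| ≤ 3 then some (max 0 (idx - 1)) else pvFwdA value ls (idx + 1)

-- second loop: for idx in range(len(levels)-1, -1, -1): if levels[idx] < value-3: return idx
-- (structural countdown: argument n means the next index tried is n-1; indices are always in range)
def pvBackA (value : Int) (levels : List Int) : Nat → Int
  | 0 => 0
  | Nat.succ k =>
    match PySem.List.pyGet? levels (k : Int) with
    | some l => if l < value - 3 then (k : Int) else pvBackA value levels k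
    | none => pvBackA value levels k

def find_end_level_index (value : Int) (levels : List Int) : Int :=
  match pvFwdA value levels 0 with
  | some r => r
  | none => pvBackA value levels levels.length

-- ===== PORT B =====
-- single forward pass; last_below : Option Int is the largest index seen with level < value-3
def pvLoopB (value : Int) : List Int → Int → Option Int → Int
  | [], _, lb => lb.getD 0
  | l :: ls, idx, lb =>
    if |value - l| ≤ 3 then max 0 (idx - 1)
    else pvLoopB value ls (idx + 1) (if l < value - 3 then some idx else lb)

def find_end_level_index_alt (value : Int) (levels : List Int) : Int :=
  pvLoopB value levels 0 none

-- ===== PRECONDITION & SPEC =====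
def Spec_find_end_level_index (value : Int) (levels : List Int) (out : Int) : Prop := out = find_end_level_index_alt value levels
instance (value : Int) (levels : List Int) (out : Int) : Decidable (Spec_find_end_level_index value levels out) := by unfold Spec_find_end_level_index; infer_instance

-- ===== CLAIM (what is proved, stated in full; the proofs are below) =====
def Claim_equal_find_end_level_index : Prop := ∀ (value : Int) (levels : List Int), Dom_find_end_level_index value levels → Spec_find_end_level_index value levels (find_end_level_index value levels)

-- ===== LEMMAS AND PROOFS =====

-- proof-only helper: the last (largest) index ≥ idx whose level is < value - 3
def pvLB (value : Int) : List Int → Int → Option Int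
  | [], _ => none
  | l :: ls, idx => (pvLB value ls (idx + 1)).or (if l < value - 3 then some idx else none)

theorem pvLoopB_eq (value : Int) : ∀ (ls : List Int) (idx : Int) (lb : Option Int),
    pvLoopB value ls idx lb =
      match pvFwdA value ls idx with
      | some r => r
      | none => ((pvLB value ls idx).or lb).getD 0 := by
  intro ls
  induction ls with
  | nil => intro idx lb; simp [pvLoopB, pvFwdA, pvLB]
  | cons l ls ih =>
    intro idx lb
    by_cases h : |value - l| ≤ 3
    · simp [pvLoopB, pvFwdA, h]
    · have hlb : (if l < value - 3 then some idx else lb) =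
          ((if l < value - 3 then some idx else none).or lb) := by
        split_ifs <;> rfl
      simp only [pvLoopB, pvFwdA, pvLB, h, ih, hlb, Option.or_assoc, if_false]

theorem pvLB_append (value : Int) (x : Int) : ∀ (xs : List Int) (idx : Int),
    pvLB value (xs ++ [x]) idx =
      (if x < value - 3 then some (idx + (xs.length : Int)) else none).or (pvLB value xs idx) := by
  intro xs
  induction xs with
  | nil => intro idx; simp [pvLB]
  | cons y xs ih =>
    intro idx
    simp only [List.cons_append, pvLB, ih, Option.or_assoc, List.length_cons]
    have : idx + 1 + (xs.length : Int) = idx + ((xs.length : Int) + 1) := by ring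
    rw [this]
    push_cast
    ring_nf

theorem pvBackA_eq (value : Int) (levels : List Int) : ∀ (n : Nat), n ≤ levels.length →
    pvBackA value levels n = (pvLB value (levels.take n) 0).getD 0 := by
  intro n
  induction n with
  | zero => intro _; simp [pvBackA, pvLB]
  | succ k ih =>
    intro h
    have hk : k < levels.length := by omega
    have hget : PySem.List.pyGet? levels (k : Int) = some levels[k] := by
      simp [pysem, hk]
    have htake : levels.take (k + 1) = levels.take k ++ [levels[k]] :=
      List.take_succ_eq_append_getElem hk
    have hlen : ((levels.take k).length : Int) = (k : Int) := by
      simp [List.length_take, Nat.min_eq_left (le_of_lt hk)]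
    rw [pvBackA, hget, htake, pvLB_append, hlen]
    by_cases hb : levels[k] < value - 3
    · simp [hb]
    · simp [hb, ih (le_of_lt hk)]

-- ===== VERDICT (by name: the statement is the Claim_ definition above) =====
theorem find_end_level_index_spec : Claim_equal_find_end_level_index := by
  intro value levels _
  unfold Spec_find_end_level_index find_end_level_index find_end_level_index_alt
  rw [pvLoopB_eq]
  cases hf : pvFwdA value levels 0 with
  | some r => rfl
  | none =>
    simp only
    rw [pvBackA_eq value levels levels.length (le_refl _), List.take_length, Option.or_none]
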